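-- pv_equiv track=rewrite | github.com/ychan96/kMC_Rust | kmc_new/utils.py | identify_final_products
-- ===== SOURCE A (Python) =====
-- def identify_final_products(chain_array):
--     """Extract chain lengths from final state"""
--     products = []
--     start = 0
--
--     for i in range(1, len(chain_array)):
--         if chain_array[i] == 0: # Chain break found
--             length = i - start
--             if length > 0:
--                 products.append(length)
--             start = i
--
--     return products
-- ===== SOURCE B (Python) =====
-- def identify_final_products(chain_array):
--     """Extract chain lengths from final state"""
--     boundaries = [0] + [i for i in range(1, len(chain_array)) if chain_array[i] == 0]
--     return [b - a for a, b in zip(boundaries, boundaries[1:])]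
-- ===== Notes on version B (the rewrite author's own statement) =====
-- stated objective: simpler
-- what changed: Replaces the fused running-start accumulator loop with two declarative passes: collect zero-boundary indices (seeded with the virtual 0), then take consecutive differences.
import Mathlib
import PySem

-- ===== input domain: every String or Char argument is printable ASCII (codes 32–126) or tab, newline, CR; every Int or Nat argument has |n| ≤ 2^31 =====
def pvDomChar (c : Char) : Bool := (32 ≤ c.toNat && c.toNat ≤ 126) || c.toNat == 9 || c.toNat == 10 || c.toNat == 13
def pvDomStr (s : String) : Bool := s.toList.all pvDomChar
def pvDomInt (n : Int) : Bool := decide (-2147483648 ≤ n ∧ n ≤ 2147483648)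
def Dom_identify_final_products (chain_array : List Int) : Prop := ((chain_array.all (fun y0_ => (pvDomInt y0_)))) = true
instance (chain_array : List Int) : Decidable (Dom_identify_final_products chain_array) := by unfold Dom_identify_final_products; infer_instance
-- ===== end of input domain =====

-- B replaces A's fused running-start accumulator loop by two declarative passes
-- (collect zero-boundary indices seeded with 0, then consecutive differences); equal value, same cost.

-- ===== PORT A =====
-- A indexes chain_array[i] only for i in range(1, len), always in range, so pyGetD is exact here.
def identify_final_products (chain_array : List Int) : List Int :=
  (((PySem.List.pyRange 1 (chain_array.length : Int) 1).foldl
      (fun (st : List Int × Int) (i : Int) =>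
        if PySem.List.pyGetD chain_array i 0 = 0 then
          (if i - st.2 > 0 then st.1 ++ [i - st.2] else st.1, i)
        else st)
      ([], 0))).1

-- ===== PORT B =====
def identify_final_products_alt (chain_array : List Int) : List Int :=
  let boundaries : List Int :=
    0 :: (PySem.List.pyRange 1 (chain_array.length : Int) 1).filter
      (fun i => PySem.List.pyGetD chain_array i 0 == 0)
  (boundaries.zip boundaries.tail).map (fun p => p.2 - p.1)

-- ===== PRECONDITION & SPEC =====
def Spec_identify_final_products (chain_array : List Int) (out : List Int) : Prop := out = identify_final_products_alt chain_array
instance (chain_array : List Int) (out : List Int) : Decidable (Spec_identify_final_products chain_array out) := by unfold Spec_identify_final_products; infer_instance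

-- ===== CLAIM (what is proved, stated in full; the proofs are below) =====
def Claim_equal_identify_final_products : Prop := ∀ (chain_array : List Int), Dom_identify_final_products chain_array → Spec_identify_final_products chain_array (identify_final_products chain_array)

-- ===== LEMMAS AND PROOFS =====

-- consecutive differences of a boundary list
def pvDiffs (bs : List Int) : List Int := (bs.zip bs.tail).map (fun p => p.2 - p.1)

theorem pvDiffs_cons_cons (x y : Int) (r : List Int) :
    pvDiffs (x :: y :: r) = (y - x) :: pvDiffs (y :: r) := rfl

-- loop invariant: A's fold over a strictly increasing index list, all above start,
-- appends exactly the consecutive differences of (start :: kept indices).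
theorem pv_loop (chain : List Int) (l : List Int) :
    ∀ (ps : List Int) (st : Int), l.Pairwise (· < ·) → (∀ i ∈ l, st < i) →
    (l.foldl
      (fun (acc : List Int × Int) (i : Int) =>
        if PySem.List.pyGetD chain i 0 = 0 then
          (if i - acc.2 > 0 then acc.1 ++ [i - acc.2] else acc.1, i)
        else acc)
      (ps, st)).1
    = ps ++ pvDiffs (st :: l.filter (fun i => PySem.List.pyGetD chain i 0 == 0)) := by
  induction l with
  | nil => intro ps st _ _; simp [pvDiffs]
  | cons a l ih =>
    intro ps st hpw hgt
    have hst : st < a := hgt a (by simp)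
    have hpw' := (List.pairwise_cons.mp hpw).2
    have hgt' : ∀ i ∈ l, a < i := (List.pairwise_cons.mp hpw).1
    simp only [List.foldl_cons]
    by_cases hz : PySem.List.pyGetD chain a 0 = 0
    · have hpos : a - st > 0 := by omega
      rw [if_pos hz, if_pos hpos]
      rw [ih (ps ++ [a - st]) a hpw' hgt']
      simp [hz, pvDiffs_cons_cons]
    · rw [if_neg hz, ih ps st hpw' (fun i hi => hgt i (List.mem_cons_of_mem a hi))]
      simp [hz]

-- ===== VERDICT (by name: the statement is the Claim_ definition above) =====
theorem identify_final_products_spec : Claim_equal_identify_final_products := by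
  intro chain _
  unfold Spec_identify_final_products identify_final_products identify_final_products_alt
  rw [pv_loop chain _ [] 0 (PySem.List.pairwise_lt_pyRange_one _ _)
      (fun i hi => ((PySem.List.mem_pyRange_one).mp hi).1.trans_lt' (by norm_num))]
  simp [pvDiffs]
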